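-- pv_equiv track=rewrite | github.com/zorikg/KoBE | code/eval_main.py | match_ids
-- ===== SOURCE A (Python) =====
-- from collections import defaultdict, Counter
--
-- def match_ids(src_annotations, cnd_annotations):
--     counters = Counter()
--     for src_annotation, cnd_annotation in zip(src_annotations, cnd_annotations):
--         cnd_ids_counter = Counter()
--         for cnd_entity in cnd_annotation['entities']:
--             counters.update(['cnd_count'])
--             cnd_ids_counter.update([cnd_entity['id']])
--         for src_entity in src_annotation['entities']:
--             counters.update(['src_count'])
--             if src_entity['id'] in cnd_ids_counter:
--                 counters.update(['match_count'])
--                 cnd_ids_counter.subtract([src_entity['id']])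
--                 if cnd_ids_counter[src_entity['id']] == 0:
--                     cnd_ids_counter.pop(src_entity['id'])
--     return counters
-- ===== SOURCE B (Python) =====
-- from collections import Counter
--
-- def match_ids(src_annotations, cnd_annotations):
--     counters = Counter()
--     for src_annotation, cnd_annotation in zip(src_annotations, cnd_annotations):
--         src_ids = Counter(e['id'] for e in src_annotation['entities'])
--         cnd_ids = Counter(e['id'] for e in cnd_annotation['entities'])
--         c = sum(cnd_ids.values())
--         s = sum(src_ids.values())
--         m = sum((src_ids & cnd_ids).values())
--         if c:
--             counters['cnd_count'] += c
--         if s: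
--             counters['src_count'] += s
--         if m:
--             counters['match_count'] += m
--     return counters
-- ===== Notes on version B (the rewrite author's own statement) =====
-- stated objective: simpler
-- what changed: Per pair, B builds two Counters of entity ids and takes the multiset intersection sum((src_ids & cnd_ids).values()) for the match count, adding the three per-pair totals in bulk, instead of A's scan that consumes the candidate counter entity by entity (decrement-and-pop).
import Mathlib
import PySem

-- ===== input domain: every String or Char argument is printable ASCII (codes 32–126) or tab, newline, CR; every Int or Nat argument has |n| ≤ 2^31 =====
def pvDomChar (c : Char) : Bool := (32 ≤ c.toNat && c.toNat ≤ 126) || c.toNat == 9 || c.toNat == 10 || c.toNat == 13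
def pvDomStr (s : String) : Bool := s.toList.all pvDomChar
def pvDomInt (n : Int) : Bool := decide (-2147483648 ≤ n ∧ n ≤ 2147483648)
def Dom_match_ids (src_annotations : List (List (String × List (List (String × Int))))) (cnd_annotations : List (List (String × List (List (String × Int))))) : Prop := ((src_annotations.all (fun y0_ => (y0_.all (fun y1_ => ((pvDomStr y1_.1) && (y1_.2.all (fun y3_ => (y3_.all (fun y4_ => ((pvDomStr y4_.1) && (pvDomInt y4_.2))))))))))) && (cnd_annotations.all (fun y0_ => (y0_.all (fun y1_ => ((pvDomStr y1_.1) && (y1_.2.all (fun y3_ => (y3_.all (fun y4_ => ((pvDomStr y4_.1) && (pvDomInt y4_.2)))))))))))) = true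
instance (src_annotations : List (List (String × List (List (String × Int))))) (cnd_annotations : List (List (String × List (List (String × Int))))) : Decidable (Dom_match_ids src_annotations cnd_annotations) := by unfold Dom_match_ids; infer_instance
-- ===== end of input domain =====

-- B replaces A's consume-and-decrement matching by per-pair Counter intersection with bulk accumulation (objective: simpler).

-- shared accessors: ann['entities'] and entity['id'] (exact under Pre_, where the keys are present; Python raises KeyError otherwise)
def pvGetEntities (ann : List (String × List (List (String × Int)))) : List (List (String × Int)) :=
  (PySem.Dict.mk ann).getD "entities" []
def pvGetId (e : List (String × Int)) : Int :=
  (PySem.Dict.mk e).getD "id" 0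

-- ===== PORT A =====
-- one iteration of A's outer loop: the two inner entity loops with the consumed cnd_ids_counter
def pvStepA (counters : PySem.Dict String Int)
    (p : (List (String × List (List (String × Int)))) × (List (String × List (List (String × Int))))) :
    PySem.Dict String Int :=
  let st := (pvGetEntities p.2).foldl
      (fun (st : PySem.Dict String Int × PySem.Dict Int Int) ce =>
        (st.1.modify "cnd_count" 0 (· + 1), st.2.modify (pvGetId ce) 0 (· + 1)))
      (counters, PySem.Dict.empty)
  ((pvGetEntities p.1).foldl
      (fun (st : PySem.Dict String Int × PySem.Dict Int Int) se =>
        let counters := st.1.modify "src_count" 0 (· + 1)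
        if st.2.contains (pvGetId se) then
          let counters := counters.modify "match_count" 0 (· + 1)
          let c2 := st.2.modify (pvGetId se) 0 (· - 1)
          (counters, if c2.getD (pvGetId se) 0 == 0 then c2.erase (pvGetId se) else c2)
        else (counters, st.2))
      st).1

def match_ids (src_annotations : List (List (String × List (List (String × Int))))) (cnd_annotations : List (List (String × List (List (String × Int))))) : List (String × Int) :=
  ((src_annotations.zip cnd_annotations).foldl pvStepA PySem.Dict.empty).items

-- ===== PORT B =====
-- sum((a & b).values()): Counter.__and__ iterates a's items and keeps the keys with positive min
def pvInterSum (a b : PySem.Dict Int Int) : Int :=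
  ((a.items.filterMap (fun q =>
      let w := min q.2 (b.getD q.1 0)
      if 0 < w then some (q.1, w) else none)).map (fun q => q.2)).sum

-- one iteration of B's loop: two Counters of ids, three bulk totals, guarded so no zero entry is created
def pvStepB (counters : PySem.Dict String Int)
    (p : (List (String × List (List (String × Int)))) × (List (String × List (List (String × Int))))) :
    PySem.Dict String Int :=
  let srcIds := PySem.Dict.counter ((pvGetEntities p.1).map pvGetId)
  let cndIds := PySem.Dict.counter ((pvGetEntities p.2).map pvGetId)
  let c := cndIds.values.sum
  let s := srcIds.values.sum
  let m := pvInterSum srcIds cndIds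
  let counters := if c ≠ 0 then counters.insert "cnd_count" (counters.getD "cnd_count" 0 + c) else counters
  let counters := if s ≠ 0 then counters.insert "src_count" (counters.getD "src_count" 0 + s) else counters
  if m ≠ 0 then counters.insert "match_count" (counters.getD "match_count" 0 + m) else counters

def match_ids_alt (src_annotations : List (List (String × List (List (String × Int))))) (cnd_annotations : List (List (String × List (List (String × Int))))) : List (String × Int) :=
  ((src_annotations.zip cnd_annotations).foldl pvStepB PySem.Dict.empty).items

-- ===== PRECONDITION & SPEC =====
-- Pre_ excludes exactly the inputs where Python A raises KeyError: a zipped annotation without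
-- the key 'entities', or an entity dict without the key 'id'.
def Pre_match_ids (src_annotations : List (List (String × List (List (String × Int))))) (cnd_annotations : List (List (String × List (List (String × Int))))) : Prop :=
  ∀ p ∈ src_annotations.zip cnd_annotations,
    ((PySem.Dict.mk p.1).get? "entities").isSome = true ∧
    ((PySem.Dict.mk p.2).get? "entities").isSome = true ∧
    (∀ e ∈ pvGetEntities p.1, ((PySem.Dict.mk e).get? "id").isSome = true) ∧
    (∀ e ∈ pvGetEntities p.2, ((PySem.Dict.mk e).get? "id").isSome = true)
instance (src_annotations : List (List (String × List (List (String × Int))))) (cnd_annotations : List (List (String × List (List (String × Int))))) : Decidable (Pre_match_ids src_annotations cnd_annotations) := by unfold Pre_match_ids; infer_instance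
def pvWitness_match_ids : (List (List (String × List (List (String × Int))))) × (List (List (String × List (List (String × Int))))) :=
  ([[("entities", [[("id", 1)], [("id", 2)]])]], [[("entities", [[("id", 1)]])]])

def Spec_match_ids (src_annotations : List (List (String × List (List (String × Int))))) (cnd_annotations : List (List (String × List (List (String × Int))))) (out : List (String × Int)) : Prop := out = match_ids_alt src_annotations cnd_annotations
instance (src_annotations : List (List (String × List (List (String × Int))))) (cnd_annotations : List (List (String × List (List (String × Int))))) (out : List (String × Int)) : Decidable (Spec_match_ids src_annotations cnd_annotations out) := by unfold Spec_match_ids; infer_instance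

-- ===== CLAIM (what is proved, stated in full; the proofs are below) =====
def Claim_equal_match_ids : Prop := ∀ (src_annotations : List (List (String × List (List (String × Int))))) (cnd_annotations : List (List (String × List (List (String × Int))))), Dom_match_ids src_annotations cnd_annotations → Pre_match_ids src_annotations cnd_annotations → Spec_match_ids src_annotations cnd_annotations (match_ids src_annotations cnd_annotations)

-- ===== LEMMAS AND PROOFS =====


theorem pv_insert_comm_of_contains {κ ν : Type} [BEq κ] [LawfulBEq κ] (d : PySem.Dict κ ν)
    (k k' : κ) (v w : ν) (hk : d.contains k = true) (hne : k ≠ k') :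
    (d.insert k' w).insert k v = (d.insert k v).insert k' w := by
  have hbne : (k == k') = false := by simpa using hne
  have hbne' : (k' == k) = false := by simpa using (Ne.symm hne)
  set f : κ × ν → κ × ν := fun p => if p.1 == k then (k, v) else p with hf
  set f' : κ × ν → κ × ν := fun p => if p.1 == k' then (k', w) else p with hf'
  have hfst : ∀ p : κ × ν, (f p).1 = p.1 := by
    intro p; simp only [hf]; split
    · next h => simp at h; simp [h]
    · rfl
  have hck' : (d.insert k v).contains k' = d.contains k' := by
    rw [PySem.Dict.contains_insert]; simp [hbne']
  have hck : (d.insert k' w).contains k = true := by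
    rw [PySem.Dict.contains_insert]; simp [hk]
  by_cases hc' : d.contains k'
  · -- both keys present: both sides are in-place maps, which commute pointwise
    apply PySem.Dict.ext
    rw [PySem.Dict.items_insert_of_contains _ _ hck,
        PySem.Dict.items_insert_of_contains _ _ hc',
        PySem.Dict.items_insert_of_contains _ _ (by rw [hck']; exact hc'),
        PySem.Dict.items_insert_of_contains _ _ hk]
    simp only [List.map_map]
    apply List.map_congr_left
    intro p _
    simp only [Function.comp]
    by_cases h1 : p.1 == k'
    · simp at h1; simp [h1, hbne']
    · by_cases h2 : p.1 == k
      · simp at h2; simp [h2, hbne]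
      · simp [h1, h2]
  · -- k' fresh: the (k', w) entry appends on both sides, the k update maps in place
    apply PySem.Dict.ext
    rw [PySem.Dict.items_insert_of_contains (d.insert k' w) v hck,
        PySem.Dict.items_insert_of_not_contains d w (by simpa using hc'),
        PySem.Dict.items_insert_of_not_contains (d.insert k v) w (by rw [hck']; simpa using hc'),
        PySem.Dict.items_insert_of_contains d v hk]
    simp only [List.map_append, List.map_cons, List.map_nil]
    congr 1
    simp [hbne']



def pvHits : List Int → PySem.Dict Int Int → Int
  | [], _ => 0
  | x :: xs, ctr =>
    if ctr.contains x then
      let c2 := ctr.modify x 0 (· - 1)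
      1 + pvHits xs (if c2.getD x 0 == 0 then c2.erase x else c2)
    else pvHits xs ctr

theorem pv_get?_erase {κ ν : Type} [BEq κ] [LawfulBEq κ] [DecidableEq κ] (d : PySem.Dict κ ν) (k k' : κ) :
    (d.erase k).get? k' = if k' = k then none else d.get? k' := by
  obtain ⟨l⟩ := d
  induction l with
  | nil => simp [PySem.Dict.erase, PySem.Dict.get?]
  | cons p rest ih =>
    simp only [PySem.Dict.erase, PySem.Dict.get?, List.filter_cons] at *
    by_cases h1 : p.1 = k <;> by_cases h2 : p.1 = k' <;>
      simp_all [beq_iff_eq]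

theorem pv_contains_erase {κ ν : Type} [BEq κ] [LawfulBEq κ] [DecidableEq κ] (d : PySem.Dict κ ν) (k k' : κ) :
    (d.erase k).contains k' = if k' = k then false else d.contains k' := by
  rw [PySem.Dict.contains_eq_isSome_get?, PySem.Dict.contains_eq_isSome_get?, pv_get?_erase]
  split <;> simp

theorem pv_getD_erase {κ ν : Type} [BEq κ] [LawfulBEq κ] [DecidableEq κ] (d : PySem.Dict κ ν) (k k' : κ) (dflt : ν) :
    (d.erase k).getD k' dflt = if k' = k then dflt else d.getD k' dflt := by
  simp only [PySem.Dict.getD, pv_get?_erase]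
  split <;> simp

theorem pv_dec_getD (ctr : PySem.Dict Int Int) (x : Int) (hc : ctr.contains x = true)
    (hg1 : 1 ≤ ctr.getD x 0) (k : Int) :
    (if (ctr.modify x 0 (· - 1)).getD x 0 == 0 then (ctr.modify x 0 (· - 1)).erase x
     else ctr.modify x 0 (· - 1)).getD k 0 = ctr.getD k 0 - (if k = x then 1 else 0) := by
  have hm : ∀ j, (ctr.modify x 0 (· - 1)).getD j 0 = if j = x then ctr.getD x 0 - 1 else ctr.getD j 0 :=
    fun j => PySem.Dict.getD_modify ctr x j 0 (· - 1)
  by_cases hz : (ctr.modify x 0 (· - 1)).getD x 0 == 0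
  · rw [if_pos hz, pv_getD_erase]
    have hz' : ctr.getD x 0 - 1 = 0 := by have := hm x; simp_all
    by_cases hkx : k = x
    · subst hkx; simp [hz']
    · simp [hkx, hm k]
  · rw [if_neg hz, hm k]
    by_cases hkx : k = x
    · subst hkx; simp
    · simp [hkx]

theorem pv_dec_contains (ctr : PySem.Dict Int Int) (x : Int) (k : Int) (hkx : k ≠ x) :
    (if (ctr.modify x 0 (· - 1)).getD x 0 == 0 then (ctr.modify x 0 (· - 1)).erase x
     else ctr.modify x 0 (· - 1)).contains k = ctr.contains k := by
  have hmc : (ctr.modify x 0 (· - 1)).contains k = ctr.contains k := by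
    show (ctr.insert x _).contains k = ctr.contains k
    rw [PySem.Dict.contains_insert]
    simp [hkx]
  by_cases hz : (ctr.modify x 0 (· - 1)).getD x 0 == 0
  · rw [if_pos hz, pv_contains_erase, if_neg hkx, hmc]
  · rw [if_neg hz, hmc]

theorem pv_dec_pos (ctr : PySem.Dict Int Int) (x : Int) (hc : ctr.contains x = true)
    (hpos : ∀ k, ctr.contains k = true → 1 ≤ ctr.getD k 0) :
    ∀ k, (if (ctr.modify x 0 (· - 1)).getD x 0 == 0 then (ctr.modify x 0 (· - 1)).erase x
     else ctr.modify x 0 (· - 1)).contains k = true → 1 ≤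
      (if (ctr.modify x 0 (· - 1)).getD x 0 == 0 then (ctr.modify x 0 (· - 1)).erase x
       else ctr.modify x 0 (· - 1)).getD k 0 := by
  intro k hk
  rw [pv_dec_getD ctr x hc (hpos x hc) k]
  by_cases hkx : k = x
  · -- k = x is still contained only in the non-erase branch, where the count stayed ≠ 0
    rw [if_pos hkx]
    by_cases hz : (ctr.modify x 0 (· - 1)).getD x 0 == 0
    · rw [if_pos hz, pv_contains_erase, if_pos hkx] at hk; simp at hk
    · have hm : (ctr.modify x 0 (· - 1)).getD x 0 = ctr.getD x 0 - 1 := by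
        have := PySem.Dict.getD_modify ctr x x 0 (· - 1); simp_all
      have := hpos x hc
      simp only [hm, beq_iff_eq] at hz
      rw [hkx]
      omega
  · rw [pv_dec_contains ctr x k hkx] at hk
    have := hpos k hk
    simp [hkx]
    omega

theorem pvHits_nonneg (xs : List Int) (ctr : PySem.Dict Int Int) : 0 ≤ pvHits xs ctr := by
  induction xs generalizing ctr with
  | nil => simp [pvHits]
  | cons x xs ih =>
    simp only [pvHits]
    split
    · have := ih (if (ctr.modify x 0 (· - 1)).getD x 0 == 0 then (ctr.modify x 0 (· - 1)).erase x
        else ctr.modify x 0 (· - 1))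
      omega
    · exact ih ctr

theorem pv_hits_eq_sum (xs : List Int) (ctr : PySem.Dict Int Int)
    (hpos : ∀ k, ctr.contains k = true → 1 ≤ ctr.getD k 0) :
    pvHits xs ctr = ∑ k ∈ xs.toFinset, min (xs.count k : Int) (ctr.getD k 0) := by
  induction xs generalizing ctr with
  | nil => simp [pvHits]
  | cons x xs ih =>
    have hnn : ∀ k, 0 ≤ ctr.getD k 0 := by
      intro k
      by_cases hc : ctr.contains k
      · have := hpos k hc; omega
      · rw [PySem.Dict.getD_of_not_contains _ _ (by simpa using hc)]
    simp only [pvHits, List.toFinset_cons]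
    by_cases hc : ctr.contains x
    · rw [if_pos hc]
      set ctr' := (if (ctr.modify x 0 (· - 1)).getD x 0 == 0 then (ctr.modify x 0 (· - 1)).erase x
        else ctr.modify x 0 (· - 1)) with hctr'
      have hg1 : 1 ≤ ctr.getD x 0 := hpos x hc
      have hD : ∀ k, ctr'.getD k 0 = ctr.getD k 0 - (if k = x then 1 else 0) :=
        pv_dec_getD ctr x hc hg1
      rw [ih ctr' (pv_dec_pos ctr x hc hpos)]
      have key : ∀ k ∈ insert x xs.toFinset,
          min (((x :: xs).count k : Int)) (ctr.getD k 0) =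
            min ((xs.count k : Int)) (ctr'.getD k 0) + (if k = x then 1 else 0) := by
        intro k _
        rw [hD k, List.count_cons]
        by_cases hkx : k = x
        · have hcnt : (0:Int) ≤ xs.count k := by positivity
          simp only [hkx, beq_self_eq_true]
          push_cast
          omega
        · simp [hkx, Ne.symm hkx]
      rw [Finset.sum_congr rfl key, Finset.sum_add_distrib]
      have hind : (∑ k ∈ insert x xs.toFinset, if k = x then (1:Int) else 0) = 1 := by
        rw [Finset.sum_ite_eq' (insert x xs.toFinset) x (fun _ => (1:Int))]
        simp
      rw [hind]
      by_cases hxS : x ∈ xs.toFinset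
      · rw [Finset.insert_eq_self.mpr hxS]
        ring
      · rw [Finset.sum_insert hxS]
        have hcnt0 : xs.count x = 0 := by
          rw [List.count_eq_zero]
          simpa using hxS
        have : min ((xs.count x : Int)) (ctr'.getD x 0) = 0 := by
          rw [hcnt0, hD x, if_pos rfl]
          have := hnn x
          push_cast
          omega
        rw [this]
        ring
    · rw [if_neg hc]
      have hgx : ctr.getD x 0 = 0 := PySem.Dict.getD_of_not_contains _ _ (by simpa using hc)
      rw [ih ctr hpos]
      have key : ∀ k ∈ insert x xs.toFinset,
          min (((x :: xs).count k : Int)) (ctr.getD k 0) = min ((xs.count k : Int)) (ctr.getD k 0) := by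
        intro k _
        rw [List.count_cons]
        by_cases hkx : k = x
        · have hcnt : (0:Int) ≤ xs.count k := by positivity
          rw [hkx] at *
          simp only [beq_self_eq_true, if_pos]
          push_cast
          omega
        · simp [Ne.symm hkx]
      rw [Finset.sum_congr rfl key]
      by_cases hxS : x ∈ xs.toFinset
      · rw [Finset.insert_eq_self.mpr hxS]
      · rw [Finset.sum_insert hxS]
        have hcnt0 : xs.count x = 0 := by
          rw [List.count_eq_zero]
          simpa using hxS
        rw [hcnt0, hgx]
        simp

theorem pv_filterMap_pos_sum (l : List Int) (f : Int → Int) (h : ∀ k ∈ l, 0 ≤ f k) :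
    ((l.filterMap (fun k => if 0 < f k then some (k, f k) else none)).map (fun q : Int × Int => q.2)).sum
      = (l.map f).sum := by
  induction l with
  | nil => rfl
  | cons x xs ih =>
    simp only [List.filterMap_cons, List.map_cons, List.sum_cons]
    by_cases hx : 0 < f x
    · rw [if_pos hx]
      simp only [List.map_cons, List.sum_cons]
      rw [ih (fun k hk => h k (List.mem_cons_of_mem _ hk))]
    · rw [if_neg hx]
      rw [ih (fun k hk => h k (List.mem_cons_of_mem _ hk))]
      have := h x (List.mem_cons_self)
      omega

theorem pv_counter_pos (xs : List Int) (k : Int) (h : (PySem.Dict.counter xs).contains k = true) :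
    1 ≤ (PySem.Dict.counter xs).getD k 0 := by
  rw [PySem.Dict.getD_counter]
  rw [PySem.Dict.contains_counter] at h
  have hm : k ∈ xs := by simpa using h
  have := List.count_pos_iff.mpr hm
  omega

theorem pv_counter_getD_nonneg (xs : List Int) (k : Int) :
    0 ≤ (PySem.Dict.counter xs).getD k 0 := by
  rw [PySem.Dict.getD_counter]
  positivity

theorem pv_finset_list_sum (s : Finset Int) (g : Int → Int) : (s.toList.map g).sum = ∑ k ∈ s, g k := by
  have h1 : ((s.toList.map g : List Int) : Multiset Int).sum = (s.toList.map g).sum := Multiset.sum_coe _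
  rw [← h1, ← Multiset.map_coe, Finset.coe_toList]
  rfl

theorem pv_sum_ofList_eq_finset (xs : List Int) (g : Int → Int) :
    ((PySem.Set.ofList xs).map g).sum = ∑ k ∈ xs.toFinset, g k := by
  have hperm : (PySem.Set.ofList xs).Perm xs.toFinset.toList := by
    apply (List.perm_ext_iff_of_nodup (PySem.Set.nodup_ofList xs) (Finset.nodup_toList _)).mpr
    intro a
    simp [PySem.Set.mem_ofList, Finset.mem_toList]
  rw [(hperm.map g).sum_eq, pv_finset_list_sum]

theorem pv_interSum_eq_hits (xs ys : List Int) :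
    pvInterSum (PySem.Dict.counter xs) (PySem.Dict.counter ys) = pvHits xs (PySem.Dict.counter ys) := by
  rw [pv_hits_eq_sum xs _ (fun k hk => pv_counter_pos ys k hk)]
  unfold pvInterSum
  rw [PySem.Dict.items_counter, List.filterMap_map]
  have := pv_filterMap_pos_sum (PySem.Set.ofList xs)
      (fun k => min ((xs.count k : Int)) ((PySem.Dict.counter ys).getD k 0))
      (fun k hk => by
        have h2 := pv_counter_getD_nonneg ys k
        have h3 : (0:Int) ≤ xs.count k := by positivity
        simp only []
        omega)
  simp only [Function.comp] at *
  rw [this]  -- hope shapes line up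
  rw [← pv_sum_ofList_eq_finset]

theorem pv_bump2 (counters : PySem.Dict String Int) (len m' : Int)
    (_hm : 0 ≤ m') (hz : len = 0 → m' = 0) :
    (let CC := (counters.insert "src_count" (counters.getD "src_count" 0 + 1)).insert "match_count"
        ((counters.insert "src_count" (counters.getD "src_count" 0 + 1)).getD "match_count" 0 + 1)
     let c1 := if len ≠ 0 then CC.insert "src_count" (CC.getD "src_count" 0 + len) else CC
     if m' ≠ 0 then c1.insert "match_count" (c1.getD "match_count" 0 + m') else c1) =
    (let c1 := counters.insert "src_count" (counters.getD "src_count" 0 + (len + 1))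
     c1.insert "match_count" (c1.getD "match_count" 0 + (1 + m'))) := by
  have hMS : ("match_count" : String) ≠ "src_count" := by decide
  have hSM : ("src_count" : String) ≠ "match_count" := by decide
  simp only []
  set gS := counters.getD "src_count" 0 with hgSd
  set A1 := counters.insert "src_count" (gS + 1) with hA1
  have hA1c : A1.contains "src_count" = true := by
    rw [hA1]; exact PySem.Dict.contains_insert_self _ _ _
  set CC := A1.insert "match_count" (A1.getD "match_count" 0 + 1) with hCC
  have hA1gM : A1.getD "match_count" 0 = counters.getD "match_count" 0 := by
    rw [hA1, PySem.Dict.getD_insert_of_ne _ _ _ hMS]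
  have hCgS : CC.getD "src_count" 0 = gS + 1 := by
    rw [hCC, PySem.Dict.getD_insert_of_ne _ _ _ hSM, hA1, PySem.Dict.getD_insert_self]
  have hCgM : CC.getD "match_count" 0 = counters.getD "match_count" 0 + 1 := by
    rw [hCC, PySem.Dict.getD_insert_self, hA1gM]
  have hc1gM : (counters.insert "src_count" (gS + (len + 1))).getD "match_count" 0
      = counters.getD "match_count" 0 := PySem.Dict.getD_insert_of_ne _ _ _ hMS
  by_cases hlen : len = 0
  · have hm0 : m' = 0 := hz hlen
    simp only [hlen, hm0, ne_eq, not_true_eq_false, if_false]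
    rw [hCC, hA1, hA1gM, PySem.Dict.getD_insert_of_ne _ _ _ hMS]
    norm_num
  · rw [if_pos hlen]
    have hcomm : CC.insert "src_count" (gS + 1 + len)
        = (counters.insert "src_count" (gS + 1 + len)).insert "match_count"
            (counters.getD "match_count" 0 + 1) := by
      rw [hCC, hA1gM, pv_insert_comm_of_contains A1 "src_count" "match_count" _ _ hA1c hSM,
          hA1, PySem.Dict.insert_insert_self]
    by_cases hm0 : m' = 0
    · rw [if_neg (by simp [hm0])]
      rw [hCgS, hcomm, hc1gM, hm0]
      have : gS + 1 + len = gS + (len + 1) := by ring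
      rw [this]
      norm_num
    · rw [if_pos hm0, hCgS, hcomm]
      rw [PySem.Dict.getD_insert_self, PySem.Dict.insert_insert_self, hc1gM]
      have h1 : gS + 1 + len = gS + (len + 1) := by ring
      have h2 : counters.getD "match_count" 0 + 1 + m' = counters.getD "match_count" 0 + (1 + m') := by ring
      rw [h1, h2]

theorem pv_src_loop (ses : List (List (String × Int))) (counters : PySem.Dict String Int)
    (ctr : PySem.Dict Int Int)
    (hpos : ∀ k, ctr.contains k = true → 1 ≤ ctr.getD k 0) :
    (ses.foldl
      (fun (st : PySem.Dict String Int × PySem.Dict Int Int) se =>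
        let counters := st.1.modify "src_count" 0 (· + 1)
        if st.2.contains (pvGetId se) then
          let counters := counters.modify "match_count" 0 (· + 1)
          let c2 := st.2.modify (pvGetId se) 0 (· - 1)
          (counters, if c2.getD (pvGetId se) 0 == 0 then c2.erase (pvGetId se) else c2)
        else (counters, st.2))
      (counters, ctr)).1 =
    (let s : Int := ses.length
     let m := pvHits (ses.map pvGetId) ctr
     let c1 := if s ≠ 0 then counters.insert "src_count" (counters.getD "src_count" 0 + s) else counters
     if m ≠ 0 then c1.insert "match_count" (c1.getD "match_count" 0 + m) else c1) := by
  induction ses generalizing counters ctr with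
  | nil => simp [pvHits]
  | cons se ses ih =>
    have hMS : ("match_count" : String) ≠ "src_count" := by decide
    have hSM : ("src_count" : String) ≠ "match_count" := by decide
    simp only [List.foldl_cons, List.map_cons, List.length_cons, pvHits]
    by_cases hc : ctr.contains (pvGetId se)
    · have hdecpos := pv_dec_pos ctr (pvGetId se) hc hpos
      have hm0 := pvHits_nonneg (ses.map pvGetId)
        (if ((ctr.modify (pvGetId se) 0 (· - 1)).getD (pvGetId se) 0 == 0)
          then (ctr.modify (pvGetId se) 0 (· - 1)).erase (pvGetId se)
          else ctr.modify (pvGetId se) 0 (· - 1))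
      simp only [PySem.Dict.modify] at hdecpos hm0 ih ⊢
      simp only [hc, reduceIte]
      set ctr2 := (if ((ctr.insert (pvGetId se) (ctr.getD (pvGetId se) 0 - 1)).getD (pvGetId se) 0 == 0)
          then (ctr.insert (pvGetId se) (ctr.getD (pvGetId se) 0 - 1)).erase (pvGetId se)
          else ctr.insert (pvGetId se) (ctr.getD (pvGetId se) 0 - 1)) with hctr2
      rw [ih _ _ hdecpos]
      have hz : (ses.length : Int) = 0 → pvHits (ses.map pvGetId) ctr2 = 0 := by
        intro h
        have he : ses = [] := List.length_eq_zero_iff.mp (by exact_mod_cast h)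
        simp [he, pvHits]
      have hb := pv_bump2 counters (ses.length : Int) (pvHits (ses.map pvGetId) ctr2) hm0 hz
      rw [hb]
      have hcast : ((ses.length + 1 : Nat) : Int) = (ses.length : Int) + 1 := by push_cast; ring
      rw [hcast]
      have hnn := Int.natCast_nonneg ses.length
      split_ifs with h1 h2 h3
      · rfl
      all_goals omega
    · have hcf : ctr.contains (pvGetId se) = false := by simpa using hc
      simp only [PySem.Dict.modify] at ih ⊢
      simp only [hcf, Bool.false_eq_true, if_false]
      rw [ih _ _ hpos]
      have hcast : ((ses.length + 1 : Nat) : Int) = (ses.length : Int) + 1 := by push_cast; ring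
      rw [hcast]
      by_cases hlen : (ses.length : Int) = 0
      · have he : ses = [] := List.length_eq_zero_iff.mp (by exact_mod_cast hlen)
        subst he
        norm_num [pvHits]
      · have hnn := Int.natCast_nonneg ses.length
        rw [if_pos hlen, if_pos (show ((ses.length : Int) + 1) ≠ 0 from by omega)]
        rw [PySem.Dict.getD_insert_self, PySem.Dict.insert_insert_self]
        have h1 : counters.getD "src_count" 0 + 1 + (ses.length : Int)
            = counters.getD "src_count" 0 + ((ses.length : Int) + 1) := by ring
        rw [h1]

theorem pv_foldl_prod {α β γ : Type} (l : List γ) (f : α → γ → α) (g : β → γ → β) (a : α) (b : β) :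
    l.foldl (fun st x => (f st.1 x, g st.2 x)) (a, b) = (l.foldl f a, l.foldl g b) := by
  induction l generalizing a b with
  | nil => rfl
  | cons x xs ih => simpa using ih (f a x) (g b x)

theorem pv_foldl_bump (l : List (List (String × Int))) (d : PySem.Dict String Int) (k : String) :
    l.foldl (fun d _ => d.insert k (d.getD k 0 + 1)) d =
      if l.length = 0 then d else d.insert k (d.getD k 0 + l.length) := by
  induction l generalizing d with
  | nil => rfl
  | cons x xs ih =>
    simp only [List.foldl_cons, ih, List.length_cons]
    by_cases h : xs.length = 0
    · simp [h]
    · rw [if_neg h, if_neg (by omega)]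
      rw [PySem.Dict.getD_insert_self, PySem.Dict.insert_insert_self]
      congr 1
      push_cast
      ring


theorem pv_sum_count (xs : List Int) : ∑ k ∈ xs.toFinset, List.count k xs = xs.length := by
  induction xs with
  | nil => simp
  | cons x xs ih =>
    simp only [List.toFinset_cons, List.count_cons]
    by_cases h : x ∈ xs.toFinset
    · rw [Finset.insert_eq_self.mpr h, Finset.sum_add_distrib, ih]
      simp [h, List.length_cons]
    · rw [Finset.sum_insert h, Finset.sum_add_distrib]
      have hc : List.count x xs = 0 := by
        simp [List.count_eq_zero]; simpa using h
      have hz : ∀ k ∈ xs.toFinset, (if (x == k) = true then 1 else 0) = 0 := by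
        intro k hk; simp only [beq_iff_eq, ite_eq_right_iff]; rintro rfl; exact absurd hk h
      rw [Finset.sum_congr rfl hz]
      simp only [List.length_cons, hc, ih]
      simp
      omega

theorem pv_counter_values_sum (xs : List Int) :
    (PySem.Dict.counter xs).values.sum = (xs.length : Int) := by
  have hv : (PySem.Dict.counter xs).values = (PySem.Set.ofList xs).map (fun k => (xs.count k : Int)) := by
    show ((PySem.Dict.counter xs).items.map Prod.snd) = _
    rw [PySem.Dict.items_counter, List.map_map]
    rfl
  rw [hv, pv_sum_ofList_eq_finset]
  have h := pv_sum_count xs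
  push_cast [← h]
  rfl

theorem pv_src_loop' (ses : List (List (String × Int))) (counters : PySem.Dict String Int)
    (ctr : PySem.Dict Int Int)
    (hpos : ∀ k, ctr.contains k = true → 1 ≤ ctr.getD k 0) :
    (ses.foldl
      (fun (st : PySem.Dict String Int × PySem.Dict Int Int) se =>
        if st.2.contains (pvGetId se) = true then
          ((st.1.insert "src_count" (st.1.getD "src_count" 0 + 1)).insert "match_count"
              ((st.1.insert "src_count" (st.1.getD "src_count" 0 + 1)).getD "match_count" 0 + 1),
            if ((st.2.insert (pvGetId se) (st.2.getD (pvGetId se) 0 - 1)).getD (pvGetId se) 0 == 0) = true then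
              (st.2.insert (pvGetId se) (st.2.getD (pvGetId se) 0 - 1)).erase (pvGetId se)
            else st.2.insert (pvGetId se) (st.2.getD (pvGetId se) 0 - 1))
        else (st.1.insert "src_count" (st.1.getD "src_count" 0 + 1), st.2))
      (counters, ctr)).1 =
    (let s : Int := ses.length
     let m := pvHits (ses.map pvGetId) ctr
     let c1 := if s ≠ 0 then counters.insert "src_count" (counters.getD "src_count" 0 + s) else counters
     if m ≠ 0 then c1.insert "match_count" (c1.getD "match_count" 0 + m) else c1) := by
  have h := pv_src_loop ses counters ctr hpos
  simpa only [PySem.Dict.modify] using h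

theorem pv_step_eq : pvStepA = pvStepB := by
  funext counters p
  unfold pvStepA pvStepB
  simp only [PySem.Dict.modify]
  have hprod := pv_foldl_prod (pvGetEntities p.2)
      (fun d (_ : List (String × Int)) => d.insert "cnd_count" (d.getD "cnd_count" 0 + 1))
      (fun d ce => d.insert (pvGetId ce) (d.getD (pvGetId ce) 0 + 1))
      counters (PySem.Dict.empty : PySem.Dict Int Int)
  simp only [] at hprod
  rw [hprod]
  have hctr : (pvGetEntities p.2).foldl
      (fun d ce => d.insert (pvGetId ce) (d.getD (pvGetId ce) 0 + 1)) PySem.Dict.empty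
      = PySem.Dict.counter ((pvGetEntities p.2).map pvGetId) := by
    rw [← PySem.Dict.foldl_insert_getD_add_one_eq_counter, List.foldl_map]
  rw [hctr, pv_foldl_bump,
      pv_src_loop' (pvGetEntities p.1) _ _
        (fun k hk => pv_counter_pos ((pvGetEntities p.2).map pvGetId) k hk),
      pv_interSum_eq_hits, pv_counter_values_sum, pv_counter_values_sum]
  simp only [List.length_map]
  have hcnd : (if (pvGetEntities p.2).length = 0 then counters
        else counters.insert "cnd_count" (counters.getD "cnd_count" 0 + ((pvGetEntities p.2).length : Int)))
      = (if ((pvGetEntities p.2).length : Int) ≠ 0 then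
          counters.insert "cnd_count" (counters.getD "cnd_count" 0 + ((pvGetEntities p.2).length : Int))
        else counters) := by
    by_cases h : (pvGetEntities p.2).length = 0
    · simp [h]
    · rw [if_neg h, if_pos (by exact_mod_cast h)]
  rw [hcnd]

-- ===== VERDICT (by name: the statement is the Claim_ definition above) =====
theorem match_ids_spec : Claim_equal_match_ids := by
  intro src cnd _ _
  unfold Spec_match_ids match_ids match_ids_alt
  rw [pv_step_eq]
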